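-- pv_equiv track=rewrite | github.com/Martiin17/TDA_resueltos | PD/charlas.py | generar_p
-- ===== SOURCE A (Python) =====
-- def generar_p(charlas):
--     charlas.sort(key=lambda x: x[1])
--     #Salteo al primero
--     p = [0]
--     for i in range(1, len(charlas)):
--         menor = None
--         for j in range(i):
--             if charlas[i][0] < charlas[j][1]:
--                 if menor == None or j < menor:
--                     menor = j
--         if menor == None:
--             p.append(i)
--         else:
--             p.append(menor)
--
--     return p
-- ===== SOURCE B (Python) =====
-- # B: after the same sort by finish time, find each talk's predecessor with a
-- # hand-written binary search over the (sorted) finish times instead of A's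
-- # inner linear scan: O(n log n) vs O(n^2).  Like A, sorts `charlas` in place.
-- def generar_p(charlas):
--     charlas.sort(key=lambda x: x[1])
--     fins = [f for _, f in charlas]
--     p = [0]
--     for i in range(1, len(charlas)):
--         s = charlas[i][0]
--         lo, hi = 0, i
--         while lo < hi:
--             mid = (lo + hi) // 2
--             if fins[mid] <= s:
--                 lo = mid + 1
--             else:
--                 hi = mid
--         p.append(lo)
--     return p
-- ===== Notes on version B (the rewrite author's own statement) =====
-- stated objective: faster
-- what changed: Replaced A's inner linear minimum-scan over all earlier talks with a binary search on the sorted finish times (first finish time exceeding the talk's start), removing the quadratic inner loop.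
import Mathlib
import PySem

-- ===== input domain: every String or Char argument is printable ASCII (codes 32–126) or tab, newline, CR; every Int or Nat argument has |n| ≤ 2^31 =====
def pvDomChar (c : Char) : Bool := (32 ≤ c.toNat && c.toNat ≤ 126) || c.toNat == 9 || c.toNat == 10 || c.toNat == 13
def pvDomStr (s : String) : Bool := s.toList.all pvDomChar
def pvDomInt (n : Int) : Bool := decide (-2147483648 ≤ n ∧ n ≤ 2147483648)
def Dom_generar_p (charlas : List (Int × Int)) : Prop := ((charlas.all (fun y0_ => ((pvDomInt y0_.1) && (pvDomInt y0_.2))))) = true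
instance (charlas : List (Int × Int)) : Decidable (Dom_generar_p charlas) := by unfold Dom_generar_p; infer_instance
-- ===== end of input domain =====

-- B replaces A's inner linear scan by a binary search on the sorted finish times (asymptotically
-- faster); equivalence is about the RETURN value (both Pythons sort `charlas` in place identically).

-- ===== PORT A =====
def generar_p (charlas : List (Int × Int)) : List Int :=
  let cs := PySem.List.sorted charlas (fun x => x.2)
  (PySem.List.pyRange 1 (cs.length : Int)).foldl (fun p i =>
    let menor : Option Int :=
      (PySem.List.pyRange 0 i).foldl (fun menor j =>
        if (PySem.List.pyGetD cs i (0, 0)).1 < (PySem.List.pyGetD cs j (0, 0)).2 then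
          match menor with
          | none => some j
          | some m => if j < m then some j else some m
        else menor) none
    match menor with
    | none => p ++ [i]
    | some m => p ++ [m]) [0]

-- ===== PORT B =====
-- the hand-written `while lo < hi` binary search of Source B, step for step
def bsearchB (fins : List Int) (s : Int) (lo hi : Int) : Int :=
  if h : lo < hi then
    let mid := PySem.Int.floordiv (lo + hi) 2
    if PySem.List.pyGetD fins mid 0 ≤ s then bsearchB fins s (mid + 1) hi
    else bsearchB fins s lo mid
  else lo
termination_by (hi - lo).toNat
decreasing_by
  · have := PySem.Int.floordiv_two_mid_bounds (le_of_lt h)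
    omega
  · have hlt : PySem.Int.floordiv (lo + hi) 2 < hi := by
      rw [PySem.Int.floordiv_lt_iff_lt_mul (by norm_num)]; omega
    have := PySem.Int.floordiv_two_mid_bounds (le_of_lt h)
    omega

def generar_p_alt (charlas : List (Int × Int)) : List Int :=
  let cs := PySem.List.sorted charlas (fun x => x.2)
  let fins := cs.map (fun x => x.2)
  (PySem.List.pyRange 1 (cs.length : Int)).foldl (fun p i =>
    let s := (PySem.List.pyGetD cs i (0, 0)).1
    p ++ [bsearchB fins s 0 i]) [0]

-- ===== PRECONDITION & SPEC =====
def Spec_generar_p (charlas : List (Int × Int)) (out : List Int) : Prop := out = generar_p_alt charlas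
instance (charlas : List (Int × Int)) (out : List Int) : Decidable (Spec_generar_p charlas out) := by unfold Spec_generar_p; infer_instance

-- ===== CLAIM (what is proved, stated in full; the proofs are below) =====
def Claim_equal_generar_p : Prop := ∀ (charlas : List (Int × Int)), Dom_generar_p charlas → Spec_generar_p charlas (generar_p charlas)

-- ===== LEMMAS AND PROOFS =====

-- once A's inner scan holds `some m` with m below every remaining index, it keeps it
theorem innerA_stays (cs : List (Int × Int)) (i : Int) (L : List Int) (m : Int)
    (hm : ∀ j ∈ L, m ≤ j) :
    L.foldl (fun menor j =>
        if (PySem.List.pyGetD cs i (0, 0)).1 < (PySem.List.pyGetD cs j (0, 0)).2 then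
          match menor with
          | none => some j
          | some m => if j < m then some j else some m
        else menor) (some m) = some m := by
  induction L with
  | nil => rfl
  | cons j t ih =>
    have hmj : m ≤ j := hm j (by simp)
    have hstep : (if (PySem.List.pyGetD cs i (0, 0)).1 < (PySem.List.pyGetD cs j (0, 0)).2 then
          (match (some m : Option Int) with
          | none => some j
          | some m => if j < m then some j else some m)
        else some m) = some m := by
      split_ifs with h
      · simp only []
        split_ifs with h2
        · exact absurd h2 (by omega)
        · rfl
      · rfl
    simp only [List.foldl_cons, hstep]
    exact ih (fun x hx => hm x (by simp [hx]))

-- A's inner scan from `none` returns the FIRST index of L whose finish exceeds the start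
theorem innerA_find (cs : List (Int × Int)) (i : Int) (L : List Int)
    (hL : L.Pairwise (· ≤ ·)) :
    L.foldl (fun menor j =>
        if (PySem.List.pyGetD cs i (0, 0)).1 < (PySem.List.pyGetD cs j (0, 0)).2 then
          match menor with
          | none => some j
          | some m => if j < m then some j else some m
        else menor) none
      = L.find? (fun j => (PySem.List.pyGetD cs i (0, 0)).1 < (PySem.List.pyGetD cs j (0, 0)).2) := by
  induction L with
  | nil => rfl
  | cons j t ih =>
    rcases List.pairwise_cons.mp hL with ⟨hj, ht⟩
    by_cases h : (PySem.List.pyGetD cs i (0, 0)).1 < (PySem.List.pyGetD cs j (0, 0)).2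
    · simp only [List.foldl_cons, List.find?_cons, if_pos h, decide_eq_true h]
      exact innerA_stays cs i t j hj
    · simp only [List.foldl_cons, List.find?_cons, if_neg h, decide_eq_false h]
      exact ih ht

-- binary-search invariant: result r ∈ [lo,hi]; everything left of r is ≤ s, everything in [r,hi) is > s
theorem bsearchB_invariant (fins : List Int) (s : Int)
    (hmono : ∀ a b : Int, 0 ≤ a → a ≤ b → b < (fins.length : Int) →
      PySem.List.pyGetD fins a 0 ≤ PySem.List.pyGetD fins b 0)
    (n : Nat) : ∀ (lo hi : Int), (hi - lo).toNat = n → 0 ≤ lo → lo ≤ hi → hi ≤ (fins.length : Int) →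
    lo ≤ bsearchB fins s lo hi ∧ bsearchB fins s lo hi ≤ hi ∧
    (∀ k : Int, lo ≤ k → k < bsearchB fins s lo hi → PySem.List.pyGetD fins k 0 ≤ s) ∧
    (∀ k : Int, bsearchB fins s lo hi ≤ k → k < hi → s < PySem.List.pyGetD fins k 0) := by
  induction n using Nat.strong_induction_on with
  | _ n ih =>
    intro lo hi hn h0 hle hhi
    rw [bsearchB]
    by_cases h : lo < hi
    · simp only [dif_pos h]
      have hmid := PySem.Int.floordiv_two_mid_bounds (le_of_lt h)
      have hmidlt : PySem.Int.floordiv (lo + hi) 2 < hi := by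
        rw [PySem.Int.floordiv_lt_iff_lt_mul (by norm_num)]; omega
      set mid := PySem.Int.floordiv (lo + hi) 2 with hmiddef
      by_cases hc : PySem.List.pyGetD fins mid 0 ≤ s
      · simp only [if_pos hc]
        obtain ⟨r1, r2, r3, r4⟩ := ih (hi - (mid + 1)).toNat (by omega) (mid + 1) hi rfl
          (by omega) (by omega) hhi
        refine ⟨by omega, r2, ?_, r4⟩
        intro k hk1 hk2
        by_cases hkm : k ≤ mid
        · exact le_trans (hmono k mid (by omega) hkm (by omega)) hc
        · exact r3 k (by omega) hk2
      · simp only [if_neg hc]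
        replace hc := lt_of_not_ge hc
        obtain ⟨r1, r2, r3, r4⟩ := ih (mid - lo).toNat (by omega) lo mid rfl
          h0 (by omega) (by omega)
        refine ⟨r1, by omega, r3, ?_⟩
        intro k hk1 hk2
        by_cases hkm : k < mid
        · exact r4 k hk1 hkm
        · exact lt_of_lt_of_le hc (hmono mid k (by omega) (by omega) (by omega))
    · simp only [dif_neg h]
      exact ⟨le_refl _, by omega, fun k hk1 hk2 => by omega, fun k hk1 hk2 => by omega⟩

theorem generar_p_spec_aux (charlas : List (Int × Int)) :
    generar_p charlas = generar_p_alt charlas := by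
  simp only [generar_p, generar_p_alt]
  set cs := PySem.List.sorted charlas (fun x => x.2) with hcs
  have hb : ∀ (p : List Int) (i : Int),
      (match (PySem.List.pyRange 0 i).foldl (fun menor j =>
          if (PySem.List.pyGetD cs i (0, 0)).1 < (PySem.List.pyGetD cs j (0, 0)).2 then
            match menor with
            | none => some j
            | some m => if j < m then some j else some m
          else menor) none with
        | none => p ++ [i]
        | some m => p ++ [m])
      = p ++ [(match (PySem.List.pyRange 0 i).foldl (fun menor j =>
          if (PySem.List.pyGetD cs i (0, 0)).1 < (PySem.List.pyGetD cs j (0, 0)).2 then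
            match menor with
            | none => some j
            | some m => if j < m then some j else some m
          else menor) none with
        | none => i
        | some m => m)] := by
    intro p i
    cases (PySem.List.pyRange 0 i).foldl (fun menor j =>
          if (PySem.List.pyGetD cs i (0, 0)).1 < (PySem.List.pyGetD cs j (0, 0)).2 then
            match menor with
            | none => some j
            | some m => if j < m then some j else some m
          else menor) none <;> rfl
  simp only [hb]
  rw [PySem.List.foldl_append_singleton_eq_map, PySem.List.foldl_append_singleton_eq_map]
  congr 1
  apply List.map_congr_left
  intro i hi
  rcases PySem.List.mem_pyRange_one.mp hi with ⟨hi1, hi2⟩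
  -- setup
  have hpair : cs.Pairwise (fun a b => a.2 ≤ b.2) := PySem.List.sorted_pairwise charlas (fun x => x.2)
  set fins := cs.map (fun x => x.2) with hfins
  have hlen : (fins.length : Int) = (cs.length : Int) := by simp [hfins]
  have hP : ∀ j : Int, (PySem.List.pyGetD cs j (0, 0)).2 = PySem.List.pyGetD fins j 0 :=
    fun j => (PySem.List.pyGetD_map (fun x => x.2) cs j (0, 0)).symm
  have hmono : ∀ a b : Int, 0 ≤ a → a ≤ b → b < (fins.length : Int) →
      PySem.List.pyGetD fins a 0 ≤ PySem.List.pyGetD fins b 0 := by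
    intro a b ha hab hbl
    rcases eq_or_lt_of_le hab with rfl | hlt
    · exact le_refl _
    · rw [PySem.List.pyGetD_eq_getElem fins 0 ha (by omega),
        PySem.List.pyGetD_eq_getElem fins 0 (by omega) hbl]
      have hgm : ∀ (k : Nat) (hk : k < fins.length), fins[k] = (cs[k]'(by simpa [hfins] using hk)).2 := by
        intro k hk; simp [hfins]
      rw [hgm a.toNat (by omega), hgm b.toNat (by omega)]
      exact (List.pairwise_iff_getElem.mp hpair) a.toNat b.toNat _ _ (by omega)
  obtain ⟨r0, ri, rleft, rright⟩ := bsearchB_invariant fins ((PySem.List.pyGetD cs i (0, 0)).1)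
    hmono (i - 0).toNat 0 i rfl (le_refl 0) (by omega) (by omega)
  set r := bsearchB fins (PySem.List.pyGetD cs i (0, 0)).1 0 i with hr
  -- the pyRange 0 i is strictly increasing
  have hL : PySem.List.pyRange 0 i = List.map (fun k : Nat => (k : Int)) (List.range i.toNat) := by
    conv_lhs => rw [show i = ((i.toNat : Nat) : Int) from by omega]
    exact PySem.List.pyRange_zero_natCast i.toNat
  have hLpair : (PySem.List.pyRange 0 i).Pairwise (· < ·) := by
    rw [hL]
    exact List.pairwise_map.mpr (List.pairwise_lt_range.imp (by intro a b hab; exact_mod_cast hab))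
  rw [innerA_find cs i _ (hLpair.imp le_of_lt)]
  cases hfind : (PySem.List.pyRange 0 i).find?
      (fun j => (PySem.List.pyGetD cs i (0, 0)).1 < (PySem.List.pyGetD cs j (0, 0)).2) with
  | none =>
    have hnone := List.find?_eq_none.mp hfind
    simp only []
    have : r = i := by
      by_contra hne
      have hri : r < i := lt_of_le_of_ne ri hne
      have hgt := rright r (le_refl r) hri
      have hmem : r ∈ PySem.List.pyRange 0 i := PySem.List.mem_pyRange_one.mpr ⟨r0, hri⟩
      have := hnone r hmem
      rw [hP r] at this
      simp only [decide_eq_true_eq] at this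
      exact this hgt
    omega
  | some m =>
    obtain ⟨hPm, as, bs, heq, has⟩ := List.find?_eq_some_iff_append.mp hfind
    simp only [decide_eq_true_eq] at hPm
    rw [hP m] at hPm
    have hmmem : m ∈ PySem.List.pyRange 0 i := by rw [heq]; simp
    rcases PySem.List.mem_pyRange_one.mp hmmem with ⟨hm0, hmi⟩
    -- every index below m fails the test
    have hbelow : ∀ j : Int, 0 ≤ j → j < m → PySem.List.pyGetD fins j 0 ≤ (PySem.List.pyGetD cs i (0, 0)).1 := by
      intro j hj0 hjm
      have hjmem : j ∈ PySem.List.pyRange 0 i := PySem.List.mem_pyRange_one.mpr ⟨hj0, by omega⟩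
      rw [heq] at hjmem
      rcases List.mem_append.mp hjmem with hja | hjc
      · have := has j hja
        simp only [Bool.not_eq_eq_eq_not, Bool.not_true, decide_eq_false_iff_not] at this
        rw [hP j] at this
        exact not_lt.mp this
      · rcases List.mem_cons.mp hjc with rfl | hjb
        · omega
        · have hpw := heq ▸ hLpair
          have := (List.pairwise_cons.mp (List.pairwise_append.mp hpw).2.1).1 j hjb
          omega
    have h1 : ¬ m < r := fun hmr => absurd hPm (not_lt.mpr (rleft m hm0 hmr))
    have h2 : ¬ r < m := by
      intro hrm
      have hgt := rright r (le_refl r) (by omega)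
      exact absurd hgt (not_lt.mpr (hbelow r r0 hrm))
    simp only []
    omega

-- ===== VERDICT (by name: the statement is the Claim_ definition above) =====
theorem generar_p_spec : Claim_equal_generar_p := by
  intro charlas _
  unfold Spec_generar_p
  exact generar_p_spec_aux charlas
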